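-- pv_equiv track=rewrite | github.com/sandbox0-ai/sandbox0 | scripts/volume_mount_bench.py | format_binary_quantity
-- ===== SOURCE A (Python) =====
-- def format_binary_quantity(value: int) -> str:
--     units = [
--         ("Ti", 1024**4),
--         ("Gi", 1024**3),
--         ("Mi", 1024**2),
--         ("Ki", 1024),
--     ]
--     for suffix, factor in units:
--         if value >= factor and value % factor == 0:
--             return f"{value // factor}{suffix}"
--     return str(value)
-- ===== SOURCE B (Python) =====
-- def format_binary_quantity(value: int) -> str:
--     suffixes = ["", "Ki", "Mi", "Gi", "Ti"]
--     v = value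
--     exp = 0
--     while value > 0 and exp < 4 and v % 1024 == 0:
--         v //= 1024
--         exp += 1
--     if exp == 0:
--         return str(value)
--     return f"{v}{suffixes[exp]}"
-- ===== Notes on version B (the rewrite author's own statement) =====
-- stated objective: alternative
-- what changed: Replaces the largest-first table scan over (suffix, factor) pairs with a count-how-many-times-divisible-by-1024 loop capped at four steps, followed by a suffix lookup by exponent.
import Mathlib
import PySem

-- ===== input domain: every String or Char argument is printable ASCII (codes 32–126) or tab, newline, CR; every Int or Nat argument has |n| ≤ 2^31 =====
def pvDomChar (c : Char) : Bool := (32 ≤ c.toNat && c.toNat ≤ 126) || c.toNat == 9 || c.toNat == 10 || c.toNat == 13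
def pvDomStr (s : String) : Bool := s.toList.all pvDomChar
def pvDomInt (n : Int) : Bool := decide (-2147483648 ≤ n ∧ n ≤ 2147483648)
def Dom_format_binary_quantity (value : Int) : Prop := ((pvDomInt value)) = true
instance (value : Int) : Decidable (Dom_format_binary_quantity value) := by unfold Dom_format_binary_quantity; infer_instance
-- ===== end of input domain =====

-- B replaces A's largest-first table scan with a divide-by-1024 counting loop plus a suffix lookup (alternative decomposition, same cost).

-- ===== PORT A =====
-- the for-loop over the units table, with early return on the first match
def fbqA_go (units : List (String × Int)) (value : Int) : String :=
  match units with
  | [] => PySem.Int.toStr value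
  | (suffix, factor) :: rest =>
      if value ≥ factor ∧ PySem.Int.mod value factor = 0 then
        PySem.Int.toStr (PySem.Int.floordiv value factor) ++ suffix
      else fbqA_go rest value

def format_binary_quantity (value : Int) : String :=
  fbqA_go [("Ti", 1024^4), ("Gi", 1024^3), ("Mi", 1024^2), ("Ki", 1024)] value

-- ===== PORT B =====
-- the while loop: while value > 0 and exp < 4 and v % 1024 == 0: v //= 1024; exp += 1
def fbqB_loop (value v : Int) (exp : Nat) : Int × Nat :=
  if value > 0 ∧ exp < 4 ∧ PySem.Int.mod v 1024 = 0 then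
    fbqB_loop value (PySem.Int.floordiv v 1024) (exp + 1)
  else (v, exp)
termination_by 4 - exp

def format_binary_quantity_alt (value : Int) : String :=
  let suffixes : List String := ["", "Ki", "Mi", "Gi", "Ti"]
  let r := fbqB_loop value value 0
  if r.2 = 0 then PySem.Int.toStr value
  else PySem.Int.toStr r.1 ++ suffixes.getD r.2 ""

-- ===== PRECONDITION & SPEC =====
def Spec_format_binary_quantity (value : Int) (out : String) : Prop := out = format_binary_quantity_alt value
instance (value : Int) (out : String) : Decidable (Spec_format_binary_quantity value out) := by unfold Spec_format_binary_quantity; infer_instance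

-- ===== CLAIM (what is proved, stated in full; the proofs are below) =====
def Claim_equal_format_binary_quantity : Prop := ∀ (value : Int), Dom_format_binary_quantity value → Spec_format_binary_quantity value (format_binary_quantity value)

-- ===== LEMMAS AND PROOFS =====

-- ===== VERDICT (by name: the statement is the Claim_ definition above) =====
-- loop-step equations for fbqB_loop
theorem fbqB_loop_step (value v : Int) (exp : Nat)
    (h : value > 0 ∧ exp < 4 ∧ PySem.Int.mod v 1024 = 0) :
    fbqB_loop value v exp = fbqB_loop value (PySem.Int.floordiv v 1024) (exp + 1) := by
  rw [fbqB_loop, if_pos h]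

theorem fbqB_loop_stop (value v : Int) (exp : Nat)
    (h : ¬ (value > 0 ∧ exp < 4 ∧ PySem.Int.mod v 1024 = 0)) :
    fbqB_loop value v exp = (v, exp) := by
  rw [fbqB_loop, if_neg h]

theorem format_binary_quantity_spec : Claim_equal_format_binary_quantity := by
  intro value hd
  have hdom : value ≤ 2147483648 := by
    unfold Dom_format_binary_quantity pvDomInt at hd
    simp only [decide_eq_true_eq] at hd
    omega
  have m1 : ∀ a : Int, PySem.Int.mod a 1024 = a % 1024 :=
    fun a => PySem.Int.mod_eq_emod_of_pos (by norm_num)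
  have m2 : ∀ a : Int, PySem.Int.mod a (1024^2) = a % (1024^2) :=
    fun a => PySem.Int.mod_eq_emod_of_pos (by norm_num)
  have m3 : ∀ a : Int, PySem.Int.mod a (1024^3) = a % (1024^3) :=
    fun a => PySem.Int.mod_eq_emod_of_pos (by norm_num)
  have m4 : ∀ a : Int, PySem.Int.mod a (1024^4) = a % (1024^4) :=
    fun a => PySem.Int.mod_eq_emod_of_pos (by norm_num)
  have d1 : ∀ a : Int, PySem.Int.floordiv a 1024 = a / 1024 :=
    fun a => PySem.Int.floordiv_eq_ediv_of_pos (by norm_num)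
  have d2 : ∀ a : Int, PySem.Int.floordiv a (1024^2) = a / (1024^2) :=
    fun a => PySem.Int.floordiv_eq_ediv_of_pos (by norm_num)
  have d3 : ∀ a : Int, PySem.Int.floordiv a (1024^3) = a / (1024^3) :=
    fun a => PySem.Int.floordiv_eq_ediv_of_pos (by norm_num)
  have d4 : ∀ a : Int, PySem.Int.floordiv a (1024^4) = a / (1024^4) :=
    fun a => PySem.Int.floordiv_eq_ediv_of_pos (by norm_num)
  unfold Spec_format_binary_quantity format_binary_quantity format_binary_quantity_alt
  simp only [fbqA_go, m1, m2, m3, m4, d1, d2, d3, d4]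
  -- the Ti branch never fires inside the domain (value ≤ 2^31 < 1024^4)
  rw [if_neg (by push Not; intro h; exfalso; norm_num at h; omega)]
  by_cases h0 : value > 0
  · by_cases h1 : value % 1024 = 0
    · by_cases h2 : value % (1024^2) = 0
      · by_cases h3 : value % (1024^3) = 0
        · -- Gi case: three loop iterations
          rw [if_pos ⟨by norm_num at h3 ⊢; omega, h3⟩]
          rw [fbqB_loop_step _ _ _ ⟨h0, by norm_num, by rw [m1]; exact h1⟩,
              fbqB_loop_step _ _ _ ⟨h0, by norm_num, by rw [m1, d1]; norm_num at h2 ⊢; omega⟩,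
              fbqB_loop_step _ _ _ ⟨h0, by norm_num, by rw [m1, d1, d1]; norm_num at h3 ⊢; omega⟩,
              fbqB_loop_stop _ _ _ (by
                rw [m1, d1, d1, d1]; push Not; intro _ _
                norm_num at h3 ⊢; omega)]
          simp only [d1, List.getD]
          norm_num
          congr 1
          norm_num at h3
          omega
        · -- Mi case: two loop iterations
          rw [if_neg (by norm_num at h3 ⊢; omega),
              if_pos ⟨by norm_num at h2 ⊢; omega, h2⟩]
          rw [fbqB_loop_step _ _ _ ⟨h0, by norm_num, by rw [m1]; exact h1⟩,
              fbqB_loop_step _ _ _ ⟨h0, by norm_num, by rw [m1, d1]; norm_num at h2 ⊢; omega⟩,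
              fbqB_loop_stop _ _ _ (by
                rw [m1, d1, d1]; push Not; intro _ _
                norm_num at h3 ⊢; omega)]
          simp only [d1, List.getD]
          norm_num
          congr 1
          norm_num at h2
          omega
      · -- Ki case: one loop iteration
        rw [if_neg (by norm_num at h2 ⊢; omega),
            if_neg (by norm_num at h2 ⊢; omega),
            if_pos ⟨by omega, h1⟩]
        rw [fbqB_loop_step _ _ _ ⟨h0, by norm_num, by rw [m1]; exact h1⟩,
            fbqB_loop_stop _ _ _ (by
              rw [m1, d1]; push Not; intro _ _
              norm_num at h2 ⊢; omega)]
        simp only [d1, List.getD]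
        norm_num
    · -- not divisible by 1024: both return str(value)
      rw [if_neg (by norm_num at h1 ⊢; omega),
          if_neg (by norm_num at h1 ⊢; omega),
          if_neg (fun h => h1 h.2)]
      rw [fbqB_loop_stop _ _ _ (by rw [m1]; exact fun h => h1 h.2.2)]
      norm_num
  · -- value ≤ 0: all factor comparisons fail, the loop guard fails
    rw [if_neg (by push Not; intro h; exfalso; norm_num at h; omega),
        if_neg (by push Not; intro h; exfalso; norm_num at h; omega),
        if_neg (by push Not; intro h; exfalso; omega)]
    rw [fbqB_loop_stop _ _ _ (fun h => h0 h.1)]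
    norm_num
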